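-- pv_equiv track=rewrite | github.com/Amruth-sagar/MAdVerse | hiercls/datasets/data_utils.py | get_stats_of_hierarchy
-- ===== SOURCE A (Python) =====
-- def get_stats_of_hierarchy(hierarchy_int):
--     """
--     Get statistics like number of levels and number of classes in each level of hierarchy,
--     either balanced or unbalanced.
--     -------------------------------------------------------------------------------------
--     Args:
--         hierarchy_int: integer mapping of classes in each, in the form [[1,2,3],
--                                                                         [1,3,15]...]
--     """
--     num_levels = max([len(x) for x in hierarchy_int])
--
--     num_cls_in_each_level = []
--
--     for level in range(num_levels):
--         nodes_in_curr_level = []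
--
--         for node_labels in hierarchy_int:
--             try:
--                 nodes_in_curr_level.append(node_labels[level])
--             except:
--                 continue
--         num_cls_in_each_level.append(len(set(nodes_in_curr_level)))
--
--     return num_levels, num_cls_in_each_level
-- ===== SOURCE B (Python) =====
-- def get_stats_of_hierarchy(hierarchy_int):
--     num_levels = max(len(x) for x in hierarchy_int)
--     level_sets = [set() for _ in range(num_levels)]
--     for row in hierarchy_int:
--         for lvl, label in enumerate(row):
--             level_sets[lvl].add(label)
--     return num_levels, [len(s) for s in level_sets]
-- ===== Notes on version B (the rewrite author's own statement) =====
-- stated objective: simpler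
-- what changed: Replace the level-outer loop that rescans every row per level with try/except on missing entries by a single row-outer pass that maintains one set per level, then reads off the set sizes.
-- outside the precondition, e.g. on get_stats_of_hierarchy([]): A raises ValueError, B raises ValueError
import Mathlib
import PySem

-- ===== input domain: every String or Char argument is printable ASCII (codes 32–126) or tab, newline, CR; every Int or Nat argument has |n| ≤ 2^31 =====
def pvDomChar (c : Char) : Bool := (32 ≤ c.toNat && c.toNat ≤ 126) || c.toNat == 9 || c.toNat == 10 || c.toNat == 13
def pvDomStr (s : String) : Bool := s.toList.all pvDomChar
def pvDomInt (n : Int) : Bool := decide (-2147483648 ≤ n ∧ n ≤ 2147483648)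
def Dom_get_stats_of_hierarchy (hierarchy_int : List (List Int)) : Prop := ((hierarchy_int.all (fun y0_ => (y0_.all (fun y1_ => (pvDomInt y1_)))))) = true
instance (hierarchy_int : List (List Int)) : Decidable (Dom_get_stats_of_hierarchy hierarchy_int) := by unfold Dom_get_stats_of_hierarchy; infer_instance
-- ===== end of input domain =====

-- B replaces A's level-outer rescan of all rows (with try/except) by one row-outer pass
-- maintaining a set per level: simpler and shorter.

-- ===== PORT A =====
-- num_levels = max([len(x) for x in hierarchy_int]); raises ValueError on [] (excluded by Pre_).
def get_stats_of_hierarchy (hierarchy_int : List (List Int)) : Int × List Int :=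
  let num_levels : Int :=
    ((PySem.List.max? (hierarchy_int.map (fun x => (x.length : Int))) (fun y => y)).getD 0)
  let num_cls_in_each_level : List Int :=
    (PySem.List.pyRange 0 num_levels 1).map (fun level =>
      let nodes_in_curr_level : List Int :=
        hierarchy_int.foldl (fun acc node_labels =>
          match PySem.List.pyGet? node_labels level with
          | some v => acc ++ [v]          -- append
          | none => acc) []               -- except: continue
      ((PySem.Set.ofList nodes_in_curr_level).length : Int))
  (num_levels, num_cls_in_each_level)

-- ===== PORT B =====
-- inner loop of B: for lvl, label in enumerate(row): level_sets[lvl].add(label)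
def pvAddRow (ls : List (PySem.Set Int)) (row : List Int) (i : Nat) : List (PySem.Set Int) :=
  match row with
  | [] => ls
  | x :: xs => pvAddRow (ls.set i (PySem.Set.add (ls.getD i PySem.Set.empty) x)) xs (i + 1)

def get_stats_of_hierarchy_alt (hierarchy_int : List (List Int)) : Int × List Int :=
  let num_levels : Int :=
    ((PySem.List.max? (hierarchy_int.map (fun x => (x.length : Int))) (fun y => y)).getD 0)
  let level_sets : List (PySem.Set Int) := List.replicate num_levels.toNat PySem.Set.empty
  let final := hierarchy_int.foldl (fun ls row => pvAddRow ls row 0) level_sets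
  (num_levels, final.map (fun s => (s.length : Int)))

-- ===== PRECONDITION & SPEC =====
-- Pre_ excludes exactly the empty list, on which A's max([]) raises ValueError (B raises too).
def Pre_get_stats_of_hierarchy (hierarchy_int : List (List Int)) : Prop := hierarchy_int ≠ []
instance (hierarchy_int : List (List Int)) : Decidable (Pre_get_stats_of_hierarchy hierarchy_int) := by unfold Pre_get_stats_of_hierarchy; infer_instance
def pvWitness_get_stats_of_hierarchy : List (List Int) := [[1, 2], [1]]

def Spec_get_stats_of_hierarchy (hierarchy_int : List (List Int)) (out : Int × List Int) : Prop := out = get_stats_of_hierarchy_alt hierarchy_int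
instance (hierarchy_int : List (List Int)) (out : Int × List Int) : Decidable (Spec_get_stats_of_hierarchy hierarchy_int out) := by unfold Spec_get_stats_of_hierarchy; infer_instance

-- ===== CLAIM (what is proved, stated in full; the proofs are below) =====
def Claim_equal_get_stats_of_hierarchy : Prop := ∀ (hierarchy_int : List (List Int)), Dom_get_stats_of_hierarchy hierarchy_int → Pre_get_stats_of_hierarchy hierarchy_int → Spec_get_stats_of_hierarchy hierarchy_int (get_stats_of_hierarchy hierarchy_int)

-- ===== LEMMAS AND PROOFS =====

lemma pvAddRow_length (row : List Int) (ls : List (PySem.Set Int)) (i : Nat) :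
    (pvAddRow ls row i).length = ls.length := by
  induction row generalizing ls i with
  | nil => rfl
  | cons x xs ih =>
    simp only [pvAddRow]
    rw [ih, List.length_set]

lemma pvFoldRows_length (rows : List (List Int)) (ls : List (PySem.Set Int)) :
    (rows.foldl (fun ls row => pvAddRow ls row 0) ls).length = ls.length := by
  induction rows generalizing ls with
  | nil => rfl
  | cons r rs ih => simp [List.foldl_cons, ih, pvAddRow_length]

-- effect of one row on position j (all touched positions are in range)
lemma pvAddRow_getD (row : List Int) (ls : List (PySem.Set Int)) (i j : Nat)
    (hlen : i + row.length ≤ ls.length) :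
    (pvAddRow ls row i).getD j PySem.Set.empty =
      if i ≤ j ∧ j < i + row.length then
        PySem.Set.add (ls.getD j PySem.Set.empty) (row.getD (j - i) 0)
      else ls.getD j PySem.Set.empty := by
  induction row generalizing ls i with
  | nil => simp [pvAddRow]
  | cons x xs ih =>
    simp only [pvAddRow]
    rw [ih _ (i + 1) (by rw [List.length_set]; simp only [List.length_cons] at hlen; omega)]
    have hi : i < ls.length := by simp [List.length_cons] at hlen; omega
    have hset : ∀ k, (ls.set i (PySem.Set.add (ls.getD i PySem.Set.empty) x)).getD k PySem.Set.empty =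
        if k = i then PySem.Set.add (ls.getD i PySem.Set.empty) x else ls.getD k PySem.Set.empty := by
      intro k
      by_cases hk : k = i
      · subst hk; simp [List.getD, List.getElem?_set_self hi]
      · simp [List.getD, List.getElem?_set_ne (by omega : i ≠ k), hk]
    by_cases h1 : i + 1 ≤ j ∧ j < i + 1 + xs.length
    · rw [if_pos h1, if_pos (by simp [List.length_cons] at hlen ⊢; omega), hset]
      have : j ≠ i := by omega
      rw [if_neg this]
      congr 1
      have hji : j - i = (j - (i + 1)) + 1 := by omega
      simp [hji]
    · rw [if_neg h1, hset]
      by_cases hji : j = i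
      · subst hji
        rw [if_pos rfl, if_pos (by simp [List.length_cons])]
        simp
      · rw [if_neg hji, if_neg (by simp only [List.length_cons] at h1 ⊢; omega)]

-- one Python-level step of A's inner collection, seen at a fixed level j
def pvStep (j : Nat) (s : PySem.Set Int) (row : List Int) : PySem.Set Int :=
  if h : j < row.length then PySem.Set.add s row[j] else s

lemma pvFold_getD (rows : List (List Int)) (ls : List (PySem.Set Int)) (j : Nat)
    (hb : ∀ r ∈ rows, r.length ≤ ls.length) :
    (rows.foldl (fun ls row => pvAddRow ls row 0) ls).getD j PySem.Set.empty =
      rows.foldl (pvStep j) (ls.getD j PySem.Set.empty) := by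
  induction rows generalizing ls with
  | nil => rfl
  | cons r rs ih =>
    simp only [List.foldl_cons]
    rw [ih _ (fun r' hr' => by rw [pvAddRow_length]; exact hb r' (List.mem_cons_of_mem _ hr'))]
    congr 1
    rw [pvAddRow_getD r ls 0 j (by simpa using hb r (List.mem_cons_self))]
    by_cases hj : j < r.length
    · rw [if_pos ⟨Nat.zero_le _, by omega⟩]
      simp [pvStep, hj]
    · rw [if_neg (by omega)]
      simp [pvStep, hj]

-- A's per-level collect-then-dedup equals the running foldl of set-adds
lemma pvCollect_eq (j : Nat) (rows : List (List Int)) (acc : List Int) :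
    PySem.Set.ofList
      (rows.foldl (fun acc node_labels =>
        match PySem.List.pyGet? node_labels (j : Int) with
        | some v => acc ++ [v]
        | none => acc) acc) =
      rows.foldl (pvStep j) (PySem.Set.ofList acc) := by
  induction rows generalizing acc with
  | nil => rfl
  | cons r rs ih =>
    simp only [List.foldl_cons]
    by_cases hj : j < r.length
    · rw [PySem.List.pyGet?_natCast, List.getElem?_eq_getElem hj]
      rw [ih]
      congr 1
      rw [PySem.Set.ofList_eq_foldl, PySem.Set.ofList_eq_foldl, List.foldl_append]
      simp [pvStep, hj]
    · rw [PySem.List.pyGet?_natCast, List.getElem?_eq_none (by omega)]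
      rw [ih]
      congr 1
      simp [pvStep, hj]

-- ===== VERDICT (by name: the statement is the Claim_ definition above) =====
theorem get_stats_of_hierarchy_spec : Claim_equal_get_stats_of_hierarchy := by
  intro h _ hpre
  unfold Spec_get_stats_of_hierarchy get_stats_of_hierarchy get_stats_of_hierarchy_alt
  simp only
  set nl : Int := ((PySem.List.max? (h.map (fun x => (x.length : Int))) (fun y => y)).getD 0) with hnl
  obtain ⟨m, hm⟩ : ∃ m, PySem.List.max? (h.map (fun x => (x.length : Int))) (fun y => y) = some m := by
    rcases Option.eq_none_or_eq_some (PySem.List.max? (h.map (fun x => (x.length : Int))) (fun y => y)) with he | hs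
    · exact absurd (by simpa using (PySem.List.max?_eq_none_iff _ _).mp he) hpre
    · exact hs
  have hmax : ∀ r ∈ h, (r.length : Int) ≤ nl := by
    intro r hr
    have := PySem.List.max?_isMax hm ((r.length : Int)) (List.mem_map_of_mem hr)
    simpa [hnl, hm] using this
  have hbound : ∀ r ∈ h, r.length ≤ nl.toNat := by
    intro r hr; have := hmax r hr; omega
  congr 1
  apply List.ext_getElem
  · rw [List.length_map, List.length_map, PySem.List.length_pyRange_one, pvFoldRows_length,
        List.length_replicate]
    simp
  · intro k h1 h2
    have hk : k < nl.toNat := by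
      simpa [PySem.List.length_pyRange_one] using h1
    simp only [List.getElem_map]
    rw [PySem.List.getElem_pyRange_one]
    simp only [zero_add]
    rw [pvCollect_eq k h []]
    have hlt : k < (h.foldl (fun ls row => pvAddRow ls row 0)
        (List.replicate nl.toNat PySem.Set.empty)).length := by
      rw [pvFoldRows_length, List.length_replicate]; exact hk
    rw [← List.getD_eq_getElem _ PySem.Set.empty hlt,
        pvFold_getD h _ k (by intro r hr; rw [List.length_replicate]; exact hbound r hr)]
    have hrep : (List.replicate nl.toNat (PySem.Set.empty (α := Int))).getD k PySem.Set.empty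
        = PySem.Set.empty := by
      rw [List.getD_eq_getElem?_getD, List.getElem?_replicate]
      simp [hk]
    rw [hrep]
    rfl
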